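-- pv_equiv track=rewrite | github.com/radoslav11/acm-sgu | problems/p481/p481.py | solve_quick_dp
-- ===== SOURCE A (Python) =====
-- def solve_quick_dp(N):
--     # Using the above DP, we can find the actual sequence:
--     # https://oeis.org/A057500
--
--     f = 1
--     for i in range(3, N):
--         f *= i
--
--     ans = f
--     for i in range(N - 1, 2, -1):
--         f *= N
--         f //= N - i
--         ans += f
--
--     return ans
-- ===== SOURCE B (Python) =====
-- def solve_quick_dp(N):
--     # Closed form: ans = (N-1)(N-2)/2 * sum_{m=0}^{N-3} N^m * (N-3)!/m!,
--     # evaluated by Horner's rule with a running falling-factorial product,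
--     # so no division ever happens inside the loop.
--     if N < 3:
--         return 1
--     t = N - 3
--     acc = 1
--     p = 1
--     for m in range(t - 1, -1, -1):
--         p *= m + 1
--         acc = acc * N + p
--     return (N - 1) * (N - 2) // 2 * acc
-- ===== Notes on version B (the rewrite author's own statement) =====
-- stated objective: alternative
-- what changed: B replaces A's backward loop, which threads one running value f through incremental multiply-then-floor-divide updates, by the division-free Horner evaluation of the closed form (N-1)(N-2)//2 * sum_{m<=N-3} N^m*(N-3)!/m!, accumulating a falling-factorial product instead of dividing.
import Mathlib
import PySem

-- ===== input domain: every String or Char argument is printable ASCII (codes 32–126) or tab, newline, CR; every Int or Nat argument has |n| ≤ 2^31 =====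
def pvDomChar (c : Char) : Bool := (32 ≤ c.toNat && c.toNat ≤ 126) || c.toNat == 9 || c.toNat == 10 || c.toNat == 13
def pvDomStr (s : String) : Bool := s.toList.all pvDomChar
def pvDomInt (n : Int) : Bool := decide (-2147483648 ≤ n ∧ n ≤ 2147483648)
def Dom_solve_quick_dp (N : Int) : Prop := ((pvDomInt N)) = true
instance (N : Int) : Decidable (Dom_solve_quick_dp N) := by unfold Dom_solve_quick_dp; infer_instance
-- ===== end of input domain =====

-- B replaces A's loop of incremental multiply-then-floor-divide updates of a running
-- value f by the division-free Horner evaluation of (N-1)(N-2)/2 * sum N^m (N-3)!/m!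
-- (objective: alternative decomposition).

-- ===== PORT A =====
def solve_quick_dp (N : Int) : Int :=
  let f := (PySem.List.pyRange 3 N 1).foldl (fun f i => f * i) 1
  let p := (PySem.List.pyRange (N - 1) 2 (-1)).foldl
      (fun (p : Int × Int) i =>
        let f := PySem.Int.floordiv (p.1 * N) (N - i)
        (f, p.2 + f)) (f, f)
  p.2

-- ===== PORT B =====
def solve_quick_dp_alt (N : Int) : Int :=
  if N < 3 then 1
  else
    let t := N - 3
    let q := (PySem.List.pyRange (t - 1) (-1) (-1)).foldl
        (fun (q : Int × Int) m =>
          let p := q.1 * (m + 1)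
          (p, q.2 * N + p)) (1, 1)
    PySem.Int.floordiv ((N - 1) * (N - 2)) 2 * q.2

-- ===== PRECONDITION & SPEC =====
def Spec_solve_quick_dp (N : Int) (out : Int) : Prop := out = solve_quick_dp_alt N
instance (N : Int) (out : Int) : Decidable (Spec_solve_quick_dp N out) := by unfold Spec_solve_quick_dp; infer_instance

-- ===== CLAIM (what is proved, stated in full; the proofs are below) =====
def Claim_equal_solve_quick_dp : Prop := ∀ (N : Int), Dom_solve_quick_dp N → Spec_solve_quick_dp N (solve_quick_dp N)

-- ===== LEMMAS AND PROOFS =====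

-- cN N k = (N-1)! / (2 * k!): the coefficient of N^k in both programs' terms
def cN (N : Int) (k : Nat) : Nat := (N - 1).toNat.factorial / (2 * k.factorial)

-- TN N k = the k-th term (N-1)!/2 * N^k / k! of the sum, as an integer
def TN (N : Int) (k : Nat) : Int := (cN N k : Int) * N ^ k

lemma two_mul_fact_dvd_fact {k m : Nat} (h : k + 2 ≤ m) :
    2 * k.factorial ∣ m.factorial := by
  have h2 : 2 * k.factorial ∣ (k + 2).factorial := by
    obtain ⟨c, hc⟩ := Nat.even_mul_succ_self (k + 1)
    refine ⟨c, ?_⟩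
    have e : (k + 2).factorial = k.factorial * ((k + 1) * (k + 2)) := by
      simp [Nat.factorial_succ]; ring
    rw [e, hc]; ring
  exact dvd_trans h2 (Nat.factorial_dvd_factorial h)

lemma cN_mul_cancel {N : Int} {k : Nat} (h : (k : Int) + 3 ≤ N) :
    2 * k.factorial * cN N k = (N - 1).toNat.factorial := by
  have hk : k + 2 ≤ (N - 1).toNat := by omega
  exact Nat.mul_div_cancel' (two_mul_fact_dvd_fact hk)

lemma cN_succ {N : Int} {k : Nat} (h : (k : Int) + 4 ≤ N) :
    cN N k = (k + 1) * cN N (k + 1) := by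
  have e1 := cN_mul_cancel (N := N) (k := k) (by omega)
  have e2 := cN_mul_cancel (N := N) (k := k + 1) (by push_cast; omega)
  have e3 : 2 * k.factorial * cN N k = 2 * k.factorial * ((k + 1) * cN N (k + 1)) := by
    rw [e1, ← e2, Nat.factorial_succ]; ring
  have hpos : 0 < 2 * k.factorial := by positivity
  exact Nat.eq_of_mul_eq_mul_left hpos e3

lemma two_cN_zero {N : Int} (h : 3 ≤ N) : 2 * cN N 0 = (N - 1).toNat.factorial := by
  have e := cN_mul_cancel (N := N) (k := 0) (by push_cast; omega)
  simpa [Nat.factorial] using e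

lemma floordiv_exact {d x : Int} (hd : 0 < d) :
    PySem.Int.floordiv (d * x) d = x := by
  rw [PySem.Int.floordiv_eq_ediv_of_pos hd]
  exact Int.mul_ediv_cancel_left x (by omega)

lemma prodAux (t : Nat) :
    (List.range t).foldl (fun (a : Int) (k : Nat) => a * (3 + (k : Int))) 1 * 2
      = (((t + 2).factorial : Nat) : Int) := by
  induction t with
  | zero => simp [Nat.factorial]
  | succ n ih =>
    rw [List.range_succ, List.foldl_append]
    simp only [List.foldl_cons, List.foldl_nil]
    have e2 : ((n + 1 + 2).factorial : Int) = ((n + 2).factorial : Int) * (3 + n) := by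
      have e3 : (n + 1 + 2).factorial = (n + 2).factorial * (n + 3) := by
        rw [show n + 1 + 2 = (n + 2) + 1 from rfl, Nat.factorial_succ]; ring
      rw [e3]; push_cast; ring
    rw [e2, ← ih]; ring

lemma first_loop_eq {N : Int} (c0 : Nat) (h : 3 ≤ N)
    (hc : 2 * c0 = (N - 1).toNat.factorial) :
    (PySem.List.pyRange 3 N 1).foldl (fun f i => f * i) 1 = (c0 : Int) := by
  rw [PySem.List.pyRange_one, List.foldl_map]
  have e : (List.range (N - 3).toNat).foldl (fun (a : Int) (k : Nat) => a * (3 + (k : Int))) 1 * 2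
      = (((N - 3).toNat + 2).factorial : Int) := prodAux _
  have h2 : ((N - 3).toNat + 2) = (N - 1).toNat := by omega
  rw [h2, ← hc] at e
  push_cast at e
  omega

lemma TN_step {N : Int} {t : Nat} (ht : (t : Int) + 1 ≤ N - 3) :
    PySem.Int.floordiv (TN N t * N) ((t : Int) + 1) = TN N (t + 1) := by
  have hc : cN N t = (t + 1) * cN N (t + 1) := cN_succ (by omega)
  have e : TN N t * N = ((t : Int) + 1) * TN N (t + 1) := by
    unfold TN
    rw [hc]
    push_cast
    ring
  rw [e, floordiv_exact (by omega)]

lemma second_loop_eq {N : Int} (t : Nat) (ht : (t : Int) ≤ N - 3) :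
    ((List.range t).map (fun (k : Nat) => N - 1 - (k : Int))).foldl
      (fun (p : Int × Int) i =>
        let f := PySem.Int.floordiv (p.1 * N) (N - i)
        (f, p.2 + f)) (TN N 0, TN N 0)
      = (TN N t, ((List.range (t + 1)).map (TN N)).sum) := by
  induction t with
  | zero => simp
  | succ n ih =>
    have hn : (n : Int) ≤ N - 3 := by push_cast at ht ⊢; omega
    rw [List.range_succ, List.map_append, List.foldl_append, ih hn]
    simp only [List.map_cons, List.map_nil, List.foldl_cons, List.foldl_nil]
    have hdiv : N - (N - 1 - (n : Int)) = (n : Int) + 1 := by ring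
    rw [hdiv, TN_step (by push_cast at ht ⊢; omega)]
    rw [show n + 1 + 1 = (n + 1) + 1 from rfl, List.range_succ (n := n + 1),
        List.map_append, List.sum_append]
    simp

lemma solveA_eq {N : Int} (h : 3 ≤ N) :
    solve_quick_dp N = ((List.range ((N - 3).toNat + 1)).map (TN N)).sum := by
  simp only [solve_quick_dp]
  rw [first_loop_eq (cN N 0) h (two_cN_zero h)]
  rw [PySem.List.pyRange_neg_one]
  have h1 : (N - 1 - 2).toNat = (N - 3).toNat := by omega
  have h0 : ((cN N 0 : Int)) = TN N 0 := by simp [TN]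
  rw [h1, h0, second_loop_eq (N - 3).toNat (by omega)]

-- running state of B's Horner loop after j steps
lemma horner_loop {N : Int} (j : Nat) (hj : (j : Int) ≤ N - 3) :
    ((List.range j).map (fun (k : Nat) => N - 3 - 1 - (k : Int))).foldl
      (fun (q : Int × Int) m =>
        let p := q.1 * (m + 1)
        (p, q.2 * N + p)) (1, 1)
    = (((N - 3).toNat.descFactorial j : Int),
       ((List.range (j + 1)).map
          (fun i => ((N - 3).toNat.descFactorial i : Int) * N ^ (j - i))).sum) := by
  induction j with
  | zero => simp
  | succ n ih =>
    have hn : (n : Int) ≤ N - 3 := by push_cast at hj ⊢; omega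
    rw [List.range_succ, List.map_append, List.foldl_append, ih hn]
    simp only [List.map_cons, List.map_nil, List.foldl_cons, List.foldl_nil]
    rw [Prod.mk.injEq]
    constructor
    · -- p component
      have hcast : N - 3 - 1 - (n : Int) + 1 = ((((N - 3).toNat - n) : Nat) : Int) := by
        push_cast at hj ⊢; omega
      rw [hcast, Nat.descFactorial_succ]
      push_cast
      ring
    · -- acc component
      have hcast : N - 3 - 1 - (n : Int) + 1 = ((((N - 3).toNat - n) : Nat) : Int) := by
        push_cast at hj ⊢; omega
      rw [hcast]
      rw [List.range_succ (n := n + 1), List.map_append, List.sum_append]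
      simp only [List.map_cons, List.map_nil, List.sum_cons, List.sum_nil]
      rw [Nat.descFactorial_succ]
      have e1 : ((List.range (n + 1)).map
            (fun i => ((N - 3).toNat.descFactorial i : Int) * N ^ (n + 1 - i))).sum
          = ((List.range (n + 1)).map
            (fun i => ((N - 3).toNat.descFactorial i : Int) * N ^ (n - i) * N)).sum := by
        refine congrArg List.sum (List.map_congr_left (fun i hi => ?_))
        have : i ≤ n := by exact Nat.lt_succ_iff.mp (List.mem_range.mp hi)
        rw [show n + 1 - i = (n - i) + 1 by omega, pow_succ, ← mul_assoc]
      rw [e1, List.sum_map_mul_right]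
      simp only [Nat.sub_self, pow_zero]
      push_cast
      ring

lemma ct_descFactorial {N : Int} (h : 3 ≤ N) (m : Nat) (hm : m ≤ (N - 3).toNat) :
    cN N (N - 3).toNat * (N - 3).toNat.descFactorial ((N - 3).toNat - m) = cN N m := by
  have htm : (N - 3).toNat - ((N - 3).toNat - m) = m := by omega
  have e0 : m.factorial * (N - 3).toNat.descFactorial ((N - 3).toNat - m)
      = (N - 3).toNat.factorial := by
    have := Nat.factorial_mul_descFactorial (n := (N - 3).toNat) (k := (N - 3).toNat - m)
      (by omega)
    rwa [htm] at this
  have e1 := cN_mul_cancel (N := N) (k := (N - 3).toNat) (by omega)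
  have e2 := cN_mul_cancel (N := N) (k := m) (by omega)
  have e3 : 2 * m.factorial * (cN N (N - 3).toNat * (N - 3).toNat.descFactorial ((N - 3).toNat - m))
      = 2 * m.factorial * cN N m := by
    rw [e2]
    calc 2 * m.factorial * (cN N (N - 3).toNat * (N - 3).toNat.descFactorial ((N - 3).toNat - m))
        = 2 * (m.factorial * (N - 3).toNat.descFactorial ((N - 3).toNat - m)) * cN N (N - 3).toNat := by ring
      _ = 2 * (N - 3).toNat.factorial * cN N (N - 3).toNat := by rw [e0]
      _ = (N - 1).toNat.factorial := e1
  exact Nat.eq_of_mul_eq_mul_left (by positivity) e3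

lemma half_eq {N : Int} (h : 3 ≤ N) :
    PySem.Int.floordiv ((N - 1) * (N - 2)) 2 = (cN N (N - 3).toNat : Int) := by
  have e1 := cN_mul_cancel (N := N) (k := (N - 3).toNat) (by omega)
  have e2 : (N - 1).toNat.factorial
      = ((N - 3).toNat + 2) * (((N - 3).toNat + 1) * (N - 3).toNat.factorial) := by
    rw [show (N - 1).toNat = ((N - 3).toNat + 1) + 1 by omega, Nat.factorial_succ,
        Nat.factorial_succ]
  have e3 : 2 * cN N (N - 3).toNat = ((N - 3).toNat + 2) * ((N - 3).toNat + 1) := by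
    have := e1
    rw [e2] at this
    have hpos : 0 < (N - 3).toNat.factorial := Nat.factorial_pos _
    nlinarith [this]
  have e4 : (N - 1) * (N - 2) = 2 * (cN N (N - 3).toNat : Int) := by
    have : ((2 * cN N (N - 3).toNat : Nat) : Int)
        = (((N - 3).toNat + 2 : Nat) : Int) * (((N - 3).toNat + 1 : Nat) : Int) := by
      exact_mod_cast congrArg (Nat.cast : Nat → Int) e3
    push_cast at this
    have h1 : ((N - 3).toNat : Int) = N - 3 := by omega
    rw [h1] at this
    linarith [this]
  rw [e4, floordiv_exact (by norm_num)]

lemma solveB_eq {N : Int} (h : 3 ≤ N) :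
    solve_quick_dp_alt N = ((List.range ((N - 3).toNat + 1)).map (TN N)).sum := by
  simp only [solve_quick_dp_alt]
  rw [if_neg (by omega)]
  rw [PySem.List.pyRange_neg_one]
  have hl : (N - 3 - 1 - (-1)).toNat = (N - 3).toNat := by omega
  rw [hl, horner_loop (N - 3).toNat (by omega), half_eq h]
  set t := (N - 3).toNat with hts
  -- multiply the sum through and reflect the index
  have e5 : (cN N t : Int) *
      ((List.range (t + 1)).map (fun i => (t.descFactorial i : Int) * N ^ (t - i))).sum
      = ((List.range (t + 1)).map (fun i => (cN N t : Int) * (t.descFactorial i : Int) * N ^ (t - i))).sum := by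
    rw [← List.sum_map_mul_left]
    refine congrArg List.sum (List.map_congr_left (fun i _ => by ring))
  have e6 : ∀ i ∈ List.range (t + 1),
      (cN N t : Int) * (t.descFactorial i : Int) * N ^ (t - i) = TN N (t - i) := by
    intro i hi
    have hi' : i ≤ t := Nat.lt_succ_iff.mp (List.mem_range.mp hi)
    unfold TN
    have := ct_descFactorial h (t - i) (by omega)
    rw [show t - (t - i) = i by omega] at this
    rw [← this]
    push_cast
    ring
  have e7 : ((List.range (t + 1)).map (fun i => (cN N t : Int) * (t.descFactorial i : Int) * N ^ (t - i))).sum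
      = ((List.range (t + 1)).map (fun i => TN N (t - i))).sum :=
    congrArg List.sum (List.map_congr_left e6)
  have e8 : ((List.range (t + 1)).map (fun i => TN N (t - i))).sum
      = ((List.range (t + 1)).map (TN N)).sum := by
    have h0 := Finset.sum_range_reflect (TN N) (t + 1)
    simp only [Nat.succ_sub_one] at h0
    exact h0
  rw [e5, e7, ← e8]

-- ===== VERDICT (by name: the statement is the Claim_ definition above) =====
theorem solve_quick_dp_spec : Claim_equal_solve_quick_dp := by
  intro N _
  unfold Spec_solve_quick_dp
  by_cases h : 3 ≤ N
  · rw [solveA_eq h, solveB_eq h]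
  · simp only [solve_quick_dp, solve_quick_dp_alt]
    rw [if_pos (by omega)]
    rw [PySem.List.pyRange_one_eq_nil (by omega), PySem.List.pyRange_neg_one_eq_nil (by omega)]
    rfl
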